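-- pv_equiv track=rewrite | github.com/hendrixed/nfl-betting-analyzer | feature_engineering.py | _get_division_teams
-- ===== SOURCE A (Python) =====
-- from typing import Dict, List, Optional, Union, Any, Tuple
--
-- def _get_division_teams(team: str) -> List[str]:
--     """Get teams in the same division."""
--     divisions = {
--         'AFC_North': ['BAL', 'CIN', 'CLE', 'PIT'],
--         'AFC_South': ['HOU', 'IND', 'JAX', 'TEN'],
--         'AFC_East': ['BUF', 'MIA', 'NE', 'NYJ'],
--         'AFC_West': ['DEN', 'KC', 'LAC', 'LV'],
--         'NFC_North': ['CHI', 'DET', 'GB', 'MIN'],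
--         'NFC_South': ['ATL', 'CAR', 'NO', 'TB'],
--         'NFC_East': ['DAL', 'NYG', 'PHI', 'WAS'],
--         'NFC_West': ['ARI', 'LAR', 'SF', 'SEA']
--     }
--
--     for division, teams in divisions.items():
--         if team in teams:
--             return [t for t in teams if t != team]
--     return []
-- ===== SOURCE B (Python) =====
-- # B: flat precomputed team -> divisionmates table; O(1) lookup, no scan.
-- _MATES = {
--     'BAL': ['CIN', 'CLE', 'PIT'],
--     'CIN': ['BAL', 'CLE', 'PIT'],
--     'CLE': ['BAL', 'CIN', 'PIT'],
--     'PIT': ['BAL', 'CIN', 'CLE'],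
--     'HOU': ['IND', 'JAX', 'TEN'],
--     'IND': ['HOU', 'JAX', 'TEN'],
--     'JAX': ['HOU', 'IND', 'TEN'],
--     'TEN': ['HOU', 'IND', 'JAX'],
--     'BUF': ['MIA', 'NE', 'NYJ'],
--     'MIA': ['BUF', 'NE', 'NYJ'],
--     'NE': ['BUF', 'MIA', 'NYJ'],
--     'NYJ': ['BUF', 'MIA', 'NE'],
--     'DEN': ['KC', 'LAC', 'LV'],
--     'KC': ['DEN', 'LAC', 'LV'],
--     'LAC': ['DEN', 'KC', 'LV'],
--     'LV': ['DEN', 'KC', 'LAC'],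
--     'CHI': ['DET', 'GB', 'MIN'],
--     'DET': ['CHI', 'GB', 'MIN'],
--     'GB': ['CHI', 'DET', 'MIN'],
--     'MIN': ['CHI', 'DET', 'GB'],
--     'ATL': ['CAR', 'NO', 'TB'],
--     'CAR': ['ATL', 'NO', 'TB'],
--     'NO': ['ATL', 'CAR', 'TB'],
--     'TB': ['ATL', 'CAR', 'NO'],
--     'DAL': ['NYG', 'PHI', 'WAS'],
--     'NYG': ['DAL', 'PHI', 'WAS'],
--     'PHI': ['DAL', 'NYG', 'WAS'],
--     'WAS': ['DAL', 'NYG', 'PHI'],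
--     'ARI': ['LAR', 'SF', 'SEA'],
--     'LAR': ['ARI', 'SF', 'SEA'],
--     'SF': ['ARI', 'LAR', 'SEA'],
--     'SEA': ['ARI', 'LAR', 'SF'],
-- }
--
--
-- def _get_division_teams(team):
--     """Get teams in the same division."""
--     return list(_MATES.get(team, []))
-- ===== Notes on version B (the rewrite author's own statement) =====
-- stated objective: idiomatic
-- what changed: Replaces the per-call scan over the 8-division table and the filter comprehension with a single flat precomputed team->divisionmates dictionary, so the function is one O(1) lookup with no iteration or membership test.
import Mathlib
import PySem

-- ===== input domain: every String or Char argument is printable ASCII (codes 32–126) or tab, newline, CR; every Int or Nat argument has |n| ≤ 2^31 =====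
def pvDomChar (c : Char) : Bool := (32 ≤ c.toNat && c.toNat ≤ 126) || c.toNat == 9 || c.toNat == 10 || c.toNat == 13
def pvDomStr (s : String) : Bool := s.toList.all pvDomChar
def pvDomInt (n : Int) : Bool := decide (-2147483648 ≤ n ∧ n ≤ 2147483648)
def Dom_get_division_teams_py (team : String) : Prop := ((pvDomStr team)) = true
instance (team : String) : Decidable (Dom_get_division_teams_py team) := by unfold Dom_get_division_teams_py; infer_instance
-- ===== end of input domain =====

-- B replaces A's scan over the division table by a single flat team → divisionmates lookup table (idiomatic/constant-time; return value only).

-- ===== PORT A =====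
-- the divisions dict, in insertion order
def pvDivisions : List (String × List String) := [
  ("AFC_North", ["BAL", "CIN", "CLE", "PIT"]),
  ("AFC_South", ["HOU", "IND", "JAX", "TEN"]),
  ("AFC_East", ["BUF", "MIA", "NE", "NYJ"]),
  ("AFC_West", ["DEN", "KC", "LAC", "LV"]),
  ("NFC_North", ["CHI", "DET", "GB", "MIN"]),
  ("NFC_South", ["ATL", "CAR", "NO", "TB"]),
  ("NFC_East", ["DAL", "NYG", "PHI", "WAS"]),
  ("NFC_West", ["ARI", "LAR", "SF", "SEA"])
]

-- the for-loop over divisions.items(): first division whose team list contains `team` wins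
def pvLoopA (team : String) : List (String × List String) → List String
  | [] => []
  | (_, teams) :: rest =>
      if team ∈ teams then teams.filter (fun t => t ≠ team) else pvLoopA team rest

def get_division_teams_py (team : String) : List String :=
  pvLoopA team pvDivisions

-- ===== PORT B =====
-- flat precomputed table: team → its three divisionmates
def pvMates : PySem.Dict String (List String) := PySem.Dict.mk [
  ("BAL", ["CIN", "CLE", "PIT"]),
  ("CIN", ["BAL", "CLE", "PIT"]),
  ("CLE", ["BAL", "CIN", "PIT"]),
  ("PIT", ["BAL", "CIN", "CLE"]),
  ("HOU", ["IND", "JAX", "TEN"]),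
  ("IND", ["HOU", "JAX", "TEN"]),
  ("JAX", ["HOU", "IND", "TEN"]),
  ("TEN", ["HOU", "IND", "JAX"]),
  ("BUF", ["MIA", "NE", "NYJ"]),
  ("MIA", ["BUF", "NE", "NYJ"]),
  ("NE", ["BUF", "MIA", "NYJ"]),
  ("NYJ", ["BUF", "MIA", "NE"]),
  ("DEN", ["KC", "LAC", "LV"]),
  ("KC", ["DEN", "LAC", "LV"]),
  ("LAC", ["DEN", "KC", "LV"]),
  ("LV", ["DEN", "KC", "LAC"]),
  ("CHI", ["DET", "GB", "MIN"]),
  ("DET", ["CHI", "GB", "MIN"]),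
  ("GB", ["CHI", "DET", "MIN"]),
  ("MIN", ["CHI", "DET", "GB"]),
  ("ATL", ["CAR", "NO", "TB"]),
  ("CAR", ["ATL", "NO", "TB"]),
  ("NO", ["ATL", "CAR", "TB"]),
  ("TB", ["ATL", "CAR", "NO"]),
  ("DAL", ["NYG", "PHI", "WAS"]),
  ("NYG", ["DAL", "PHI", "WAS"]),
  ("PHI", ["DAL", "NYG", "WAS"]),
  ("WAS", ["DAL", "NYG", "PHI"]),
  ("ARI", ["LAR", "SF", "SEA"]),
  ("LAR", ["ARI", "SF", "SEA"]),
  ("SF", ["ARI", "LAR", "SEA"]),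
  ("SEA", ["ARI", "LAR", "SF"])
]

def get_division_teams_py_alt (team : String) : List String :=
  (PySem.Dict.get? pvMates team).getD []

-- ===== PRECONDITION & SPEC =====
def Spec_get_division_teams_py (team : String) (out : List String) : Prop := out = get_division_teams_py_alt team
instance (team : String) (out : List String) : Decidable (Spec_get_division_teams_py team out) := by unfold Spec_get_division_teams_py; infer_instance

-- ===== CLAIM (what is proved, stated in full; the proofs are below) =====
def Claim_equal_get_division_teams_py : Prop := ∀ (team : String), Dom_get_division_teams_py team → Spec_get_division_teams_py team (get_division_teams_py team)

-- ===== LEMMAS AND PROOFS =====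
theorem pv_eq (team : String) : get_division_teams_py team = get_division_teams_py_alt team := by
  by_cases h0 : team = "BAL"
  · subst h0; decide
  by_cases h1 : team = "CIN"
  · subst h1; decide
  by_cases h2 : team = "CLE"
  · subst h2; decide
  by_cases h3 : team = "PIT"
  · subst h3; decide
  by_cases h4 : team = "HOU"
  · subst h4; decide
  by_cases h5 : team = "IND"
  · subst h5; decide
  by_cases h6 : team = "JAX"
  · subst h6; decide
  by_cases h7 : team = "TEN"
  · subst h7; decide
  by_cases h8 : team = "BUF"
  · subst h8; decide
  by_cases h9 : team = "MIA"
  · subst h9; decide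
  by_cases h10 : team = "NE"
  · subst h10; decide
  by_cases h11 : team = "NYJ"
  · subst h11; decide
  by_cases h12 : team = "DEN"
  · subst h12; decide
  by_cases h13 : team = "KC"
  · subst h13; decide
  by_cases h14 : team = "LAC"
  · subst h14; decide
  by_cases h15 : team = "LV"
  · subst h15; decide
  by_cases h16 : team = "CHI"
  · subst h16; decide
  by_cases h17 : team = "DET"
  · subst h17; decide
  by_cases h18 : team = "GB"
  · subst h18; decide
  by_cases h19 : team = "MIN"
  · subst h19; decide
  by_cases h20 : team = "ATL"
  · subst h20; decide
  by_cases h21 : team = "CAR"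
  · subst h21; decide
  by_cases h22 : team = "NO"
  · subst h22; decide
  by_cases h23 : team = "TB"
  · subst h23; decide
  by_cases h24 : team = "DAL"
  · subst h24; decide
  by_cases h25 : team = "NYG"
  · subst h25; decide
  by_cases h26 : team = "PHI"
  · subst h26; decide
  by_cases h27 : team = "WAS"
  · subst h27; decide
  by_cases h28 : team = "ARI"
  · subst h28; decide
  by_cases h29 : team = "LAR"
  · subst h29; decide
  by_cases h30 : team = "SF"
  · subst h30; decide
  by_cases h31 : team = "SEA"
  · subst h31; decide
  simp [get_division_teams_py, get_division_teams_py_alt, pvDivisions, pvMates,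
    pvLoopA, PySem.Dict.get?, h0, h1, h2, h3, h4, h5, h6, h7, h8, h9, h10, h11, h12, h13, h14, h15, h16, h17, h18, h19, h20, h21, h22, h23, h24, h25, h26, h27, h28, h29, h30, h31, Ne.symm h0, Ne.symm h1, Ne.symm h2, Ne.symm h3, Ne.symm h4, Ne.symm h5, Ne.symm h6, Ne.symm h7, Ne.symm h8, Ne.symm h9, Ne.symm h10, Ne.symm h11, Ne.symm h12, Ne.symm h13, Ne.symm h14, Ne.symm h15, Ne.symm h16, Ne.symm h17, Ne.symm h18, Ne.symm h19, Ne.symm h20, Ne.symm h21, Ne.symm h22, Ne.symm h23, Ne.symm h24, Ne.symm h25, Ne.symm h26, Ne.symm h27, Ne.symm h28, Ne.symm h29, Ne.symm h30, Ne.symm h31]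

-- ===== VERDICT (by name: the statement is the Claim_ definition above) =====
theorem get_division_teams_py_spec : Claim_equal_get_division_teams_py := by
  intro team _
  exact pv_eq team
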